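-- pv_equiv track=rewrite | github.com/NataliaPetukhova/Python-course | Task7.py | powers
-- ===== SOURCE A (Python) =====
-- def powers(n, m):
--     answ = {}
--
--     def power(n):
--         a = 1
--         for i in range(n):
--             a *= n
--         return a
--
--     for i in range(1, n+1):
--         answ[i] = power(i) % m
--     return answ
-- ===== SOURCE B (Python) =====
-- def powers(n, m):
--     # same dict, but each i**i computed by square-and-multiply over the bits of i
--     answ = {}
--     for i in range(1, n + 1):
--         r = 1
--         base = i
--         e = i
--         while e > 0:
--             if e % 2 == 1:
--                 r *= base
--             base *= base
--             e //= 2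
--         answ[i] = r % m
--     return answ
-- ===== Notes on version B (the rewrite author's own statement) =====
-- stated objective: faster
-- what changed: The inner linear loop multiplying i by itself i times is replaced by exponentiation by squaring over the bits of i (full integer i**i, reduced mod m only at the end), removing the helper function.
import Mathlib
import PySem

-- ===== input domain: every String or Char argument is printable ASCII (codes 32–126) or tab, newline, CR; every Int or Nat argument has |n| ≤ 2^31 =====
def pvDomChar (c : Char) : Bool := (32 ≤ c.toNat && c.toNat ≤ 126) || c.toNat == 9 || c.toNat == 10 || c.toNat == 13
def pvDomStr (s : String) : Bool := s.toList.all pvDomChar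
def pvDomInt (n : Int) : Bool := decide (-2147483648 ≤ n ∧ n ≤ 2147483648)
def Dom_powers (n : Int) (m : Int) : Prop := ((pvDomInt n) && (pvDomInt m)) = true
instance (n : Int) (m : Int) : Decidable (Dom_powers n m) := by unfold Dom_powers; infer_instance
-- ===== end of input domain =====

-- B replaces A's inner linear multiply loop (i multiplications for i**i) by square-and-multiply
-- over the bits of i, reducing mod m only at the end: asymptotically fewer multiplications.

-- ===== PORT A =====
-- inner helper 'power': a = 1; for _ in range(k): a *= k
def powerA (k : Int) : Int := (PySem.List.pyRange 0 k 1).foldl (fun a _ => a * k) 1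

def powers (n : Int) (m : Int) : List (Int × Int) :=
  ((PySem.List.pyRange 1 (n + 1) 1).foldl
    (fun answ i => answ.insert i (PySem.Int.mod (powerA i) m))
    (PySem.Dict.empty : PySem.Dict Int Int)).items

-- ===== PORT B =====
-- while e > 0: if e % 2 == 1: r *= base; base *= base; e //= 2
def sqmLoop (base e r : Int) : Int :=
  if _h : 0 < e then
    sqmLoop (base * base) (PySem.Int.floordiv e 2)
      (if PySem.Int.mod e 2 = 1 then r * base else r)
  else r
termination_by e.toNat
decreasing_by
  rw [PySem.Int.floordiv_eq_ediv_of_pos (by norm_num)]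
  omega

def powers_alt (n : Int) (m : Int) : List (Int × Int) :=
  ((PySem.List.pyRange 1 (n + 1) 1).foldl
    (fun answ i => answ.insert i (PySem.Int.mod (sqmLoop i i 1) m))
    (PySem.Dict.empty : PySem.Dict Int Int)).items

-- ===== PRECONDITION & SPEC =====
-- Python's '%' raises ZeroDivisionError when m = 0 and the loop runs (n ≥ 1); both A and B raise there.
def Pre_powers (n : Int) (m : Int) : Prop := n ≤ 0 ∨ m ≠ 0
instance (n : Int) (m : Int) : Decidable (Pre_powers n m) := by unfold Pre_powers; infer_instance
def pvWitness_powers : Int × Int := (5, 7)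

def Spec_powers (n : Int) (m : Int) (out : List (Int × Int)) : Prop := out = powers_alt n m
instance (n : Int) (m : Int) (out : List (Int × Int)) : Decidable (Spec_powers n m out) := by unfold Spec_powers; infer_instance

-- ===== CLAIM (what is proved, stated in full; the proofs are below) =====
def Claim_equal_powers : Prop := ∀ (n : Int) (m : Int), Dom_powers n m → Pre_powers n m → Spec_powers n m (powers n m)

-- ===== LEMMAS AND PROOFS =====

theorem sqmLoop_eq (b e r : Int) : sqmLoop b e r = r * b ^ e.toNat := by
  by_cases h : 0 < e
  · rw [sqmLoop, dif_pos h, sqmLoop_eq,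
        PySem.Int.floordiv_eq_ediv_of_pos (by norm_num),
        PySem.Int.mod_eq_emod_of_pos (by norm_num)]
    have he : e.toNat = 2 * (e / 2).toNat + (e % 2).toNat := by omega
    rcases Int.emod_two_eq e with h2 | h2
    · have h0 : (e % 2).toNat = 0 := by omega
      rw [h2, he, h0]
      simp [two_mul, pow_add, mul_pow]
    · have h1 : (e % 2).toNat = 1 := by omega
      rw [h2, he, h1]
      simp [two_mul, pow_add, mul_pow]
      ring
  · rw [sqmLoop, dif_neg h]
    have : e.toNat = 0 := by omega
    simp [this]
termination_by e.toNat
decreasing_by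
  rw [PySem.Int.floordiv_eq_ediv_of_pos (by norm_num)]
  omega

theorem foldl_mul_const (k : Int) (l : List Int) (a : Int) :
    l.foldl (fun a _ => a * k) a = a * k ^ l.length := by
  induction l generalizing a with
  | nil => simp
  | cons x xs ih => simp [ih, pow_succ]; ring

theorem powerA_eq (k : Int) : powerA k = k ^ k.toNat := by
  rw [powerA, foldl_mul_const, PySem.List.length_pyRange_one]
  simp

theorem body_eq (m : Int) :
    (fun (answ : PySem.Dict Int Int) i => answ.insert i (PySem.Int.mod (powerA i) m))
    = (fun answ i => answ.insert i (PySem.Int.mod (sqmLoop i i 1) m)) := by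
  funext answ i
  rw [sqmLoop_eq, powerA_eq, one_mul]

-- ===== VERDICT (by name: the statement is the Claim_ definition above) =====
theorem powers_spec : Claim_equal_powers := by
  intro n m _ _
  unfold Spec_powers powers powers_alt
  rw [body_eq]
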